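-- pv_equiv track=rewrite | github.com/songuyenerza/CRAFT_text_pill | test_Bopw_label.py | convert_box
-- ===== SOURCE A (Python) =====
-- def convert_box(box_imgs):
--     box_squas = []
--     for box_img in box_imgs:
--         box_squa1= []
--         box_squa2 = []
--         for box in box_img:
--             box_squa1.append(box[0])
--             box_squa2.append(box[1])
--         box_squa = [min(box_squa1), min(box_squa2), max(box_squa1), max(box_squa2)]
--         box_squas.append(box_squa)
--     return box_squas
-- ===== SOURCE B (Python) =====
-- def convert_box(box_imgs):
--     out = []
--     for box_img in box_imgs:
--         first = box_img[0]  # IndexError on empty point set, like min([]) in A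
--         min_x = max_x = first[0]
--         min_y = max_y = first[1]
--         for box in box_img[1:]:
--             x = box[0]
--             y = box[1]
--             if x < min_x:
--                 min_x = x
--             if x > max_x:
--                 max_x = x
--             if y < min_y:
--                 min_y = y
--             if y > max_y:
--                 max_y = y
--         out.append([min_x, min_y, max_x, max_y])
--     return out
-- ===== Notes on version B (the rewrite author's own statement) =====
-- stated objective: alternative
-- what changed: Instead of building two coordinate lists per point set and reducing them with min/max, B seeds four scalar extremes from the first point and updates them in a single pass over the remaining points.
import Mathlib
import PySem

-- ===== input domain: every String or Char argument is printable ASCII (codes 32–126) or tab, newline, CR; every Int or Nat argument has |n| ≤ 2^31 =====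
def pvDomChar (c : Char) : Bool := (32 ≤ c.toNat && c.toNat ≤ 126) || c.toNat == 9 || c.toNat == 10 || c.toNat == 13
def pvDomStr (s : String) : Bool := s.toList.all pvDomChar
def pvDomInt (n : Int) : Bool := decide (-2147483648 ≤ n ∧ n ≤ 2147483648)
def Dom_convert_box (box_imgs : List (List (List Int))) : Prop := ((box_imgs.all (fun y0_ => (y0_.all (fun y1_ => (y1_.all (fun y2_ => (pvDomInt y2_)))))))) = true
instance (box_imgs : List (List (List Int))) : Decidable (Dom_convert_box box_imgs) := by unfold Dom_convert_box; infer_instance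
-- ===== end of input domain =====

-- B replaces A's build-two-lists-then-min/max per point set with a single pass
-- maintaining four scalar extremes seeded from the first point (alternative decomposition).


-- ===== PORT A =====
def convert_box (box_imgs : List (List (List Int))) : List (List Int) :=
  box_imgs.foldl
    (fun box_squas box_img =>
      let p := box_img.foldl
        (fun (s : List Int × List Int) box =>
          (s.1 ++ [PySem.List.pyGetD box 0 0], s.2 ++ [PySem.List.pyGetD box 1 0]))
        ([], [])
      box_squas ++
        [[(PySem.List.min? p.1 (fun y => y)).getD 0,
          (PySem.List.min? p.2 (fun y => y)).getD 0,
          (PySem.List.max? p.1 (fun y => y)).getD 0,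
          (PySem.List.max? p.2 (fun y => y)).getD 0]])
    []

-- ===== PORT B =====
-- bounding box of one point set; the nil case is unreachable under Pre_ (Python B raises IndexError there)
def bbox1 (box_img : List (List Int)) : List Int :=
  match box_img with
  | [] => []
  | first :: rest =>
    let x0 := PySem.List.pyGetD first 0 0
    let y0 := PySem.List.pyGetD first 1 0
    let s := rest.foldl
      (fun (s : Int × Int × Int × Int) box =>
        let x := PySem.List.pyGetD box 0 0
        let y := PySem.List.pyGetD box 1 0
        (if x < s.1 then x else s.1,
         if x > s.2.1 then x else s.2.1,
         if y < s.2.2.1 then y else s.2.2.1,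
         if y > s.2.2.2 then y else s.2.2.2))
      (x0, x0, y0, y0)
    [s.1, s.2.2.1, s.2.1, s.2.2.2]

def convert_box_alt (box_imgs : List (List (List Int))) : List (List Int) :=
  box_imgs.foldl (fun out box_img => out ++ [bbox1 box_img]) []

-- ===== PRECONDITION & SPEC =====
-- Pre_ excludes exactly the inputs on which A raises: an empty point set (ValueError from
-- taking the min of an empty list) or a point with fewer than 2 coordinates (IndexError).
def Pre_convert_box (box_imgs : List (List (List Int))) : Prop :=
  ∀ box_img ∈ box_imgs, box_img ≠ [] ∧ ∀ box ∈ box_img, 2 ≤ box.length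
instance (box_imgs : List (List (List Int))) : Decidable (Pre_convert_box box_imgs) := by unfold Pre_convert_box; infer_instance

def pvWitness_convert_box : List (List (List Int)) := [[[1, 2], [3, 0]], [[5, 5]]]

def Spec_convert_box (box_imgs : List (List (List Int))) (out : List (List Int)) : Prop := out = convert_box_alt box_imgs
instance (box_imgs : List (List (List Int))) (out : List (List Int)) : Decidable (Spec_convert_box box_imgs out) := by unfold Spec_convert_box; infer_instance

-- ===== CLAIM (what is proved, stated in full; the proofs are below) =====
def Claim_equal_convert_box : Prop := ∀ (box_imgs : List (List (List Int))), Dom_convert_box box_imgs → Pre_convert_box box_imgs → Spec_convert_box box_imgs (convert_box box_imgs)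

-- ===== LEMMAS AND PROOFS =====

-- A's inner loop builds the two coordinate lists
theorem inner_fold_eq_maps (box_img : List (List Int)) (a b : List Int) :
    box_img.foldl
      (fun (s : List Int × List Int) box =>
        (s.1 ++ [PySem.List.pyGetD box 0 0], s.2 ++ [PySem.List.pyGetD box 1 0]))
      (a, b)
    = (a ++ box_img.map (fun box => PySem.List.pyGetD box 0 0),
       b ++ box_img.map (fun box => PySem.List.pyGetD box 1 0)) := by
  induction box_img generalizing a b with
  | nil => simp
  | cons h t ih => simp [List.foldl, ih]

theorem if_lt_eq_min (x m : Int) : (if x < m then x else m) = min m x := by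
  simp [min_def]; omega

theorem if_gt_eq_max (x m : Int) : (if x > m then x else m) = max m x := by
  simp [max_def]; omega

-- B's scalar fold computes the four running extremes
theorem quad_fold_eq (rest : List (List Int)) (mx Mx my My : Int) :
    rest.foldl
      (fun (s : Int × Int × Int × Int) box =>
        let x := PySem.List.pyGetD box 0 0
        let y := PySem.List.pyGetD box 1 0
        (if x < s.1 then x else s.1,
         if x > s.2.1 then x else s.2.1,
         if y < s.2.2.1 then y else s.2.2.1,
         if y > s.2.2.2 then y else s.2.2.2))
      (mx, Mx, my, My)
    = ((rest.map (fun box => PySem.List.pyGetD box 0 0)).foldl min mx,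
       (rest.map (fun box => PySem.List.pyGetD box 0 0)).foldl max Mx,
       (rest.map (fun box => PySem.List.pyGetD box 1 0)).foldl min my,
       (rest.map (fun box => PySem.List.pyGetD box 1 0)).foldl max My) := by
  induction rest generalizing mx Mx my My with
  | nil => simp
  | cons h t ih =>
    simp only [List.foldl_cons]
    rw [ih]
    simp [if_lt_eq_min, if_gt_eq_max]

theorem bbox1_eq (first : List Int) (rest : List (List Int)) :
    [(PySem.List.min? ((first :: rest).map (fun box => PySem.List.pyGetD box 0 0)) (fun y => y)).getD 0,
     (PySem.List.min? ((first :: rest).map (fun box => PySem.List.pyGetD box 1 0)) (fun y => y)).getD 0,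
     (PySem.List.max? ((first :: rest).map (fun box => PySem.List.pyGetD box 0 0)) (fun y => y)).getD 0,
     (PySem.List.max? ((first :: rest).map (fun box => PySem.List.pyGetD box 1 0)) (fun y => y)).getD 0]
    = bbox1 (first :: rest) := by
  simp [bbox1, quad_fold_eq, PySem.List.min?_id_cons, PySem.List.max?_id_cons]

-- ===== VERDICT (by name: the statement is the Claim_ definition above) =====
theorem convert_box_spec : Claim_equal_convert_box := by
  intro box_imgs hdom hpre
  unfold Spec_convert_box convert_box convert_box_alt
  induction box_imgs using List.reverseRecOn with
  | nil => rfl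
  | append_singleton t bi ih =>
    have hdt : Dom_convert_box t := by
      simp only [Dom_convert_box, List.all_append, Bool.and_eq_true] at hdom ⊢
      exact hdom.1
    have hpt : Pre_convert_box t := fun b hb => hpre b (by simp [hb])
    have hbi := hpre bi (by simp)
    simp only [List.foldl_append, List.foldl_cons, List.foldl_nil, ih hdt hpt]
    congr 1
    obtain ⟨hne, -⟩ := hbi
    obtain ⟨first, rest, rfl⟩ := List.exists_cons_of_ne_nil hne
    rw [inner_fold_eq_maps]
    simpa using bbox1_eq first rest
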